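-- pv_equiv track=rewrite | github.com/prateek-sinha7/ai-ppt-generator | backend/app/middleware/audit.py | _resource_from_path
-- ===== SOURCE A (Python) =====
-- def _resource_from_path(path: str) -> tuple[str, str | None]:
--     """
--     Derive resource_type and resource_id from the URL path.
--
--     Examples:
--       /api/v1/presentations/abc-123        → ("presentation", "abc-123")
--       /api/v1/presentations/abc/slides/s1  → ("slide", "s1")
--       /api/v1/templates                    → ("template", None)
--       /internal/providers/p1/metrics       → ("provider", "p1")
--     """
--     parts = [p for p in path.split("/") if p]
--
--     # Strip api/v1 prefix
--     if parts and parts[0] == "api":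
--         parts = parts[1:]
--     if parts and parts[0] == "v1":
--         parts = parts[1:]
--
--     if not parts:
--         return "unknown", None
--
--     resource_map = {
--         "presentations": "presentation",
--         "slides": "slide",
--         "templates": "template",
--         "prompts": "prompt",
--         "providers": "provider",
--         "jobs": "job",
--         "cache": "cache",
--         "auth": "auth",
--         "versions": "version",
--     }
--
--     resource_type = resource_map.get(parts[0], parts[0].rstrip("s"))
--     resource_id: str | None = None
--
--     keywords = set(resource_map.keys()) | {
--         "status", "stream", "regenerate", "export", "pptx",
--         "lock", "reorder", "rollback", "diff", "merge", "metrics",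
--         "health-check", "stats", "internal",
--     }
--
--     # Walk the path segments to find the deepest resource type and its ID.
--     # Pattern: /resource/id/sub-resource/sub-id
--     current_resource = resource_type
--     current_id: str | None = None
--
--     i = 1
--     while i < len(parts):
--         part = parts[i]
--         if part in resource_map:
--             # New sub-resource — update resource type, reset id
--             current_resource = resource_map[part]
--             current_id = None
--         elif part not in keywords:
--             # This is an ID segment
--             current_id = part
--         i += 1
--
--     resource_type = current_resource
--     resource_id = current_id
--
--     return resource_type, resource_id
-- ===== SOURCE B (Python) =====
-- _RESOURCE_MAP = {
--     "presentations": "presentation",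
--     "slides": "slide",
--     "templates": "template",
--     "prompts": "prompt",
--     "providers": "provider",
--     "jobs": "job",
--     "cache": "cache",
--     "auth": "auth",
--     "versions": "version",
-- }
--
-- _KEYWORDS = frozenset(_RESOURCE_MAP) | {
--     "status", "stream", "regenerate", "export", "pptx",
--     "lock", "reorder", "rollback", "diff", "merge", "metrics",
--     "health-check", "stats", "internal",
-- }
--
--
-- def _resource_from_path(path: str) -> "tuple[str, str | None]":
--     parts = [p for p in path.split("/") if p]
--     if parts and parts[0] == "api":
--         parts = parts[1:]
--     if parts and parts[0] == "v1":
--         parts = parts[1:]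
--     if not parts:
--         return "unknown", None
--
--     # Locate-then-extract: scan the tail segments backwards for the last
--     # resource key, then pick the last non-keyword segment after it.
--     rev = parts[:0:-1]  # segments after index 0, in reverse order
--     k = 0
--     while k < len(rev) and rev[k] not in _RESOURCE_MAP:
--         k += 1
--     if k < len(rev):
--         resource_type = _RESOURCE_MAP[rev[k]]
--     else:
--         resource_type = _RESOURCE_MAP.get(parts[0], parts[0].rstrip("s"))
--     resource_id = next((p for p in rev[:k] if p not in _KEYWORDS), None)
--     return resource_type, resource_id
-- ===== Notes on version B (the rewrite author's own statement) =====
-- stated objective: alternative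
-- what changed: Replaces A's single stateful forward loop (accumulating current resource and resetting the id on each key) by a locate-then-extract decomposition: a backward scan finds the last resource-map key among the tail segments, and the id is the first non-keyword segment before it in that reversed order.
import Mathlib
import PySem

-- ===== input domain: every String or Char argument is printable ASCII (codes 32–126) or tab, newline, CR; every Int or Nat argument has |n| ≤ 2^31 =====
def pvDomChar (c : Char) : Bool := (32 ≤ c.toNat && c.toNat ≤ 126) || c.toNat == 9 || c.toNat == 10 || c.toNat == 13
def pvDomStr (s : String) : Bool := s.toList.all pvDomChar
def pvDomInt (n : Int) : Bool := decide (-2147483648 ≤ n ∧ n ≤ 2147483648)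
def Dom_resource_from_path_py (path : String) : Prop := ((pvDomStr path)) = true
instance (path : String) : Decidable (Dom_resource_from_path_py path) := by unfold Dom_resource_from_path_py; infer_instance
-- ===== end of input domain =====

-- B replaces A's stateful forward accumulating walk by a locate-then-extract backward scan
-- (find the last resource key, then the last non-keyword segment after it); objective: alternative.

-- Shared literal tables and Python built-ins used identically by both Pythons
def pvResourceMap : PySem.Dict String String := PySem.Dict.ofList
  [("presentations", "presentation"), ("slides", "slide"), ("templates", "template"),
   ("prompts", "prompt"), ("providers", "provider"), ("jobs", "job"),
   ("cache", "cache"), ("auth", "auth"), ("versions", "version")]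

def pvKeywords : PySem.Set String := PySem.Set.ofList
  (pvResourceMap.keys ++
   ["status", "stream", "regenerate", "export", "pptx",
    "lock", "reorder", "rollback", "diff", "merge", "metrics",
    "health-check", "stats", "internal"])

-- s.rstrip("s") — strip trailing 's' characters (hand port; exact for a one-char strip set)
def pvRstripS (s : String) : String :=
  String.mk ((s.toList.reverse.dropWhile (· == 's')).reverse)

-- parts = [p for p in path.split("/") if p]; strip the api/v1 prefix (identical code in A and B)
def pvParts (path : String) : List String :=
  let parts := ((PySem.Str.split? path "/").getD []).filter (fun p => p ≠ "")
  let parts := if parts.head? = some "api" then parts.tail else parts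
  if parts.head? = some "v1" then parts.tail else parts

-- ===== PORT A =====
def resource_from_path_py (path : String) : String × Option String :=
  match pvParts path with
  | [] => ("unknown", none)
  | p0 :: rest =>
    let resource_type := pvResourceMap.getD p0 (pvRstripS p0)
    let st := rest.foldl
      (fun (st : String × Option String) part =>
        if pvResourceMap.contains part then (pvResourceMap.getD part "", none)
        else if pvKeywords.contains part then st
        else (st.1, some part))
      (resource_type, none)
    (st.1, st.2)

-- ===== PORT B =====
def resource_from_path_py_alt (path : String) : String × Option String :=
  match pvParts path with
  | [] => ("unknown", none)
  | p0 :: rest =>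
    let rev := rest.reverse
    let resource_type :=
      match rev.dropWhile (fun p => !pvResourceMap.contains p) with
      | key :: _ => pvResourceMap.getD key ""
      | [] => pvResourceMap.getD p0 (pvRstripS p0)
    let resource_id :=
      (rev.takeWhile (fun p => !pvResourceMap.contains p)).find?
        (fun p => !pvKeywords.contains p)
    (resource_type, resource_id)

-- ===== PRECONDITION & SPEC =====
def Spec_resource_from_path_py (path : String) (out : String × Option String) : Prop := out = resource_from_path_py_alt path
instance (path : String) (out : String × Option String) : Decidable (Spec_resource_from_path_py path out) := by unfold Spec_resource_from_path_py; infer_instance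

-- ===== CLAIM (what is proved, stated in full; the proofs are below) =====
def Claim_equal_resource_from_path_py : Prop := ∀ (path : String), Dom_resource_from_path_py path → Spec_resource_from_path_py path (resource_from_path_py path)

-- ===== LEMMAS AND PROOFS =====

-- A's accumulating loop, characterised: the final type is the mapped value of the last
-- resource key (or the start value), and the final id is the last non-keyword segment
-- after that key (none if there is none), provided the loop starts with id = none.
theorem pv_loop_eq (rest : List String) (t : String) :
    rest.foldl
      (fun (st : String × Option String) part =>
        if pvResourceMap.contains part then (pvResourceMap.getD part "", none)
        else if pvKeywords.contains part then st
        else (st.1, some part))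
      (t, none)
    = (match rest.reverse.dropWhile (fun p => !pvResourceMap.contains p) with
       | key :: _ => pvResourceMap.getD key ""
       | [] => t,
       (rest.reverse.takeWhile (fun p => !pvResourceMap.contains p)).find?
         (fun p => !pvKeywords.contains p)) := by
  induction rest using List.reverseRecOn with
  | nil => simp
  | append_singleton rest x ih =>
      rw [List.foldl_append, ih]
      simp only [List.foldl_cons, List.foldl_nil, List.reverse_append, List.reverse_singleton,
        List.singleton_append]
      by_cases hm : pvResourceMap.contains x = true
      · simp [hm]
      · by_cases hk : x ∈ pvKeywords
        · simp [hm, hk, List.dropWhile, List.takeWhile, List.find?]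
        · simp [hm, hk, List.dropWhile, List.takeWhile, List.find?]

-- ===== VERDICT (by name: the statement is the Claim_ definition above) =====
theorem resource_from_path_py_spec : Claim_equal_resource_from_path_py := by
  intro path _
  unfold Spec_resource_from_path_py resource_from_path_py resource_from_path_py_alt
  cases pvParts path with
  | nil => rfl
  | cons p0 rest => simp only [pv_loop_eq]
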